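-- pv_equiv track=rewrite | github.com/DvidMakesThings/HW_XY-SK60-SK120_Dual-PSU | src/psu_controller/snmp_agent.py | ber_decode_int
-- ===== SOURCE A (Python) =====
-- def ber_decode_int(data):
--     """Decode BER integer value bytes."""
--     if not data:
--         return 0
--     val = 0
--     for b in data:
--         val = (val << 8) | b
--     if data[0] & 0x80:
--         val -= (1 << (len(data) * 8))
--     return val
-- ===== SOURCE B (Python) =====
-- def ber_decode_int(data):
--     """Decode BER integer value bytes."""
--     if not data:
--         return 0
--     val = _unsigned_be(data)
--     if data[0] & 0x80:
--         val -= 1 << (8 * len(data))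
--     return val
--
--
-- def _unsigned_be(xs):
--     """Big-endian assembly by divide and conquer: split in half, shift the
--     high half into place in one wide shift, OR with the low half."""
--     if len(xs) <= 1:
--         return xs[0] if xs else 0
--     mid = len(xs) // 2
--     return (_unsigned_be(xs[:mid]) << (8 * (len(xs) - mid))) | _unsigned_be(xs[mid:])
-- ===== Notes on version B (the rewrite author's own statement) =====
-- stated objective: alternative
-- what changed: B assembles the big-endian accumulation by divide and conquer -- recursively halving the byte list and OR-ing the high half into place with one wide shift -- instead of A's linear byte-at-a-time Horner fold (val = (val<<8)|b).
import Mathlib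
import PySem

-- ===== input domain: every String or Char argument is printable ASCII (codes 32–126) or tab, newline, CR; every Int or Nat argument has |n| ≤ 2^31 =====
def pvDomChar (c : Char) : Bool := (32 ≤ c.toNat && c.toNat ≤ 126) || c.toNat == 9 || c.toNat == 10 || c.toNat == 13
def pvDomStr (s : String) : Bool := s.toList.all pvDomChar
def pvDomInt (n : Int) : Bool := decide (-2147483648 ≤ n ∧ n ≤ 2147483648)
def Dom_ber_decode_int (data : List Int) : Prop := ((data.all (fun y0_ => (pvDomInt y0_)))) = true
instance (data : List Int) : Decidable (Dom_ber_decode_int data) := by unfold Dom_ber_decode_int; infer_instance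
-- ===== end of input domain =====

-- B assembles the big-endian accumulation by divide and conquer (recursive halving, one
-- wide shift + OR per merge) instead of A's linear byte-at-a-time Horner fold
-- (alternative algorithm, same cost); return value only, nothing is mutated.

-- ===== PORT A =====
def ber_decode_int (data : List Int) : Int :=
  match data with
  | [] => 0
  | d0 :: rest =>
    let val := (d0 :: rest).foldl (fun v b => PySem.Int.bor (v <<< (8 : Nat)) b) 0
    if PySem.Int.band d0 128 ≠ 0 then
      val - ((1 : Int) <<< (8 * (d0 :: rest).length))
    else val

-- ===== PORT B =====
-- _unsigned_be: xs[:mid] / xs[mid:] with mid = len(xs)//2 are List.take mid / List.drop mid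
-- (exact: 0 ≤ mid ≤ len); << is <<<, | is PySem.Int.bor, 'xs[0] if xs else 0' is headD 0.
def pvUnsignedBe (xs : List Int) : Int :=
  if _h : xs.length ≤ 1 then xs.headD 0
  else
    PySem.Int.bor
      ((pvUnsignedBe (xs.take (xs.length / 2))) <<< (8 * (xs.length - xs.length / 2)))
      (pvUnsignedBe (xs.drop (xs.length / 2)))
termination_by xs.length
decreasing_by
  · simp only [List.length_take]; omega
  · simp only [List.length_drop]; omega

def ber_decode_int_alt (data : List Int) : Int :=
  match data with
  | [] => 0
  | d0 :: rest =>
    let val := pvUnsignedBe (d0 :: rest)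
    if PySem.Int.band d0 128 ≠ 0 then
      val - ((1 : Int) <<< (8 * (d0 :: rest).length))
    else val

-- ===== PRECONDITION & SPEC =====
def Spec_ber_decode_int (data : List Int) (out : Int) : Prop := out = ber_decode_int_alt data
instance (data : List Int) (out : Int) : Decidable (Spec_ber_decode_int data out) := by unfold Spec_ber_decode_int; infer_instance

-- ===== CLAIM (what is proved, stated in full; the proofs are below) =====
def Claim_equal_ber_decode_int : Prop := ∀ (data : List Int), Dom_ber_decode_int data → Spec_ber_decode_int data (ber_decode_int data)

-- ===== LEMMAS AND PROOFS =====

-- disjoint naturals add like they OR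
lemma pv_add_or : ∀ a b : Nat, a &&& b = 0 → a + b = a ||| b := by
  intro a
  induction a using Nat.binaryRec with
  | zero => intro b h; simp
  | bit ba a' ih =>
    intro b h
    rw [← Nat.bit_testBit_zero_shiftRight_one b] at h ⊢
    rw [Nat.land_bit] at h
    rw [Nat.lor_bit]
    rw [Nat.bit_eq_zero_iff] at h
    have hadd := ih (b >>> 1) h.1
    have h2 := h.2
    simp only [Nat.bit_val]
    cases ba <;> cases hb : b.testBit 0 <;> simp only [hb] at h2 ⊢
    · simp only [Bool.false_or, Bool.toNat_false]; omega
    · simp only [Bool.false_or, Bool.toNat_false, Bool.toNat_true]; omega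
    · simp only [Bool.true_or, Bool.toNat_false, Bool.toNat_true]; omega
    · exact absurd h2 (by simp)

-- clearing a submask is the bitwise difference
lemma pv_sub_and (n p : Nat) : n - (n &&& p) = Nat.ldiff n p := by
  have hdis : (n &&& p) &&& Nat.ldiff n p = 0 := by
    apply Nat.eq_of_testBit_eq; intro i
    simp only [Nat.testBit_and, Nat.testBit_ldiff, Nat.zero_testBit]
    cases n.testBit i <;> cases p.testBit i <;> rfl
  have hor : (n &&& p) ||| Nat.ldiff n p = n := by
    apply Nat.eq_of_testBit_eq; intro i
    simp only [Nat.testBit_or, Nat.testBit_and, Nat.testBit_ldiff]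
    cases n.testBit i <;> cases p.testBit i <;> rfl
  have hle : n &&& p ≤ n := Nat.and_le_left
  have := pv_add_or _ _ hdis
  omega

-- the infinite-two's-complement bit of an Int
def pvBit (x : Int) (i : Nat) : Bool :=
  if 0 ≤ x then x.toNat.testBit i else !((-x - 1).toNat.testBit i)

lemma pvBit_ext (x y : Int) (hs : (0 ≤ x) ↔ (0 ≤ y)) (h : ∀ i, pvBit x i = pvBit y i) : x = y := by
  by_cases hx : 0 ≤ x
  · have hy := hs.mp hx
    have : x.toNat = y.toNat := Nat.eq_of_testBit_eq (fun i => by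
      have := h i; simpa [pvBit, hx, hy] using this)
    omega
  · have hy : ¬ 0 ≤ y := fun hy => hx (hs.mpr hy)
    have : (-x - 1).toNat = (-y - 1).toNat := Nat.eq_of_testBit_eq (fun i => by
      have := h i; simpa [pvBit, hx, hy] using this)
    omega

lemma pv_bor_nonneg_iff (a b : Int) : (0 ≤ PySem.Int.bor a b) ↔ (0 ≤ a ∧ 0 ≤ b) := by
  unfold PySem.Int.bor
  split_ifs with ha hb hb
  · simp only [ha, hb, and_self, iff_true]
    exact Int.natCast_nonneg _
  · have h1 : (0 : Int) ≤ (((-b - 1).toNat - ((-b - 1).toNat &&& a.toNat) : Nat) : Int) :=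
      Int.natCast_nonneg _
    constructor
    · intro h; exfalso; omega
    · intro h; exact absurd h.2 hb
  · have h1 : (0 : Int) ≤ (((-a - 1).toNat - ((-a - 1).toNat &&& b.toNat) : Nat) : Int) :=
      Int.natCast_nonneg _
    constructor
    · intro h; exfalso; omega
    · intro h; exact absurd h.1 ha
  · have h1 : (0 : Int) ≤ (((-a - 1).toNat &&& (-b - 1).toNat : Nat) : Int) :=
      Int.natCast_nonneg _
    constructor
    · intro h; exfalso; omega
    · intro h; exact absurd h.1 ha

lemma pvBit_bor (a b : Int) (i : Nat) : pvBit (PySem.Int.bor a b) i = (pvBit a i || pvBit b i) := by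
  unfold PySem.Int.bor pvBit
  by_cases ha : 0 ≤ a <;> by_cases hb : 0 ≤ b
  · rw [if_pos ha, if_pos hb, if_pos ha, if_pos hb, if_pos (Int.natCast_nonneg _),
        Int.toNat_natCast, Nat.testBit_or]
  · have h1 : (0 : Int) ≤ (((-b - 1).toNat - ((-b - 1).toNat &&& a.toNat) : Nat) : Int) :=
      Int.natCast_nonneg _
    rw [if_pos ha, if_neg hb, if_pos ha, if_neg hb, if_neg (by omega)]
    rw [show -(-((((-b - 1).toNat - ((-b - 1).toNat &&& a.toNat) : Nat) : Int)) - 1) - 1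
          = ((((-b - 1).toNat - ((-b - 1).toNat &&& a.toNat) : Nat) : Int)) by ring]
    rw [Int.toNat_natCast, pv_sub_and]
    simp only [Nat.testBit_ldiff]
    cases a.toNat.testBit i <;> cases (-b - 1).toNat.testBit i <;> rfl
  · have h1 : (0 : Int) ≤ (((-a - 1).toNat - ((-a - 1).toNat &&& b.toNat) : Nat) : Int) :=
      Int.natCast_nonneg _
    rw [if_neg ha, if_pos hb, if_neg ha, if_pos hb, if_neg (by omega)]
    rw [show -(-((((-a - 1).toNat - ((-a - 1).toNat &&& b.toNat) : Nat) : Int)) - 1) - 1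
          = ((((-a - 1).toNat - ((-a - 1).toNat &&& b.toNat) : Nat) : Int)) by ring]
    rw [Int.toNat_natCast, pv_sub_and]
    simp only [Nat.testBit_ldiff]
    cases h1 : (-a - 1).toNat.testBit i <;> cases h2 : b.toNat.testBit i <;> rfl
  · have h1 : (0 : Int) ≤ (((-a - 1).toNat &&& (-b - 1).toNat : Nat) : Int) :=
      Int.natCast_nonneg _
    rw [if_neg ha, if_neg hb, if_neg ha, if_neg hb, if_neg (by omega)]
    rw [show -(-((((-a - 1).toNat &&& (-b - 1).toNat : Nat) : Int)) - 1) - 1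
          = ((((-a - 1).toNat &&& (-b - 1).toNat : Nat) : Int)) by ring]
    rw [Int.toNat_natCast]
    simp only [Nat.testBit_and]
    cases h1 : (-a - 1).toNat.testBit i <;> cases h2 : (-b - 1).toNat.testBit i <;> rfl

lemma pv_shl_nonneg_iff (x : Int) (k : Nat) : (0 ≤ x <<< k) ↔ (0 ≤ x) := by
  rw [Int.shiftLeft_eq]
  have h2 : (0 : Int) < 2 ^ k := by positivity
  constructor
  · intro h; nlinarith
  · intro h; positivity

lemma pvBit_shl (x : Int) (k i : Nat) :
    pvBit (x <<< k) i = if i < k then false else pvBit x (i - k) := by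
  unfold pvBit
  rw [Int.shiftLeft_eq]
  have h2 : (0 : Int) < 2 ^ k := by positivity
  by_cases hx : 0 ≤ x
  · obtain ⟨m, rfl⟩ := Int.eq_ofNat_of_zero_le hx
    rw [show ((m : Int) * 2 ^ k) = ((m * 2 ^ k : Nat) : Int) by push_cast; ring,
        if_pos (Int.natCast_nonneg _), if_pos (Int.natCast_nonneg _),
        Int.toNat_natCast, Int.toNat_natCast, Nat.testBit_mul_two_pow]
    by_cases hi : i < k
    · simp [hi, show ¬ k ≤ i by omega]
    · simp [hi, show k ≤ i by omega]
  · have hxneg : x < 0 := by omega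
    have hneg : x * 2 ^ k < 0 := mul_neg_of_neg_of_pos hxneg h2
    rw [if_neg (by omega), if_neg hx]
    have hcast : ((2 ^ k * (-x - 1).toNat + (2 ^ k - 1) : Nat) : Int) = -(x * 2 ^ k) - 1 := by
      have h1 : (1 : Nat) ≤ 2 ^ k := Nat.one_le_two_pow
      push_cast [h1]
      rw [show ((-x - 1).toNat : Int) = -x - 1 by omega]
      ring
    have ht : (-(x * 2 ^ k) - 1).toNat = 2 ^ k * (-x - 1).toNat + (2 ^ k - 1) := by omega
    rw [ht, Nat.testBit_two_pow_mul_add _ (by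
      have h3 : 0 < 2 ^ k := Nat.two_pow_pos k
      omega)]
    by_cases hi : i < k
    · simp [hi, Nat.testBit_two_pow_sub_one]
    · simp [hi]

-- Python's '|' distributes over '<<'
lemma pv_shl_bor (x y : Int) (k : Nat) :
    (PySem.Int.bor x y) <<< k = PySem.Int.bor (x <<< k) (y <<< k) := by
  apply pvBit_ext
  · rw [pv_shl_nonneg_iff, pv_bor_nonneg_iff, pv_bor_nonneg_iff,
        pv_shl_nonneg_iff, pv_shl_nonneg_iff]
  · intro i
    rw [pvBit_shl, pvBit_bor, pvBit_bor, pvBit_shl, pvBit_shl]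
    by_cases hi : i < k <;> simp [hi]

lemma pv_bor_assoc (a b c : Int) :
    PySem.Int.bor (PySem.Int.bor a b) c = PySem.Int.bor a (PySem.Int.bor b c) := by
  apply pvBit_ext
  · rw [pv_bor_nonneg_iff, pv_bor_nonneg_iff, pv_bor_nonneg_iff, pv_bor_nonneg_iff]
    tauto
  · intro i
    rw [pvBit_bor, pvBit_bor, pvBit_bor, pvBit_bor, Bool.or_assoc]

lemma pv_bor_zero_left (x : Int) : PySem.Int.bor 0 x = x := by
  rw [PySem.Int.bor_comm, PySem.Int.bor_zero]

-- starting A's fold at v instead of 0 ORs v, shifted past the whole list, onto the result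
lemma pv_fold_from (t : List Int) : ∀ v : Int,
    t.foldl (fun v b => PySem.Int.bor (v <<< (8 : Nat)) b) v
      = PySem.Int.bor (v <<< (8 * t.length))
          (t.foldl (fun v b => PySem.Int.bor (v <<< (8 : Nat)) b) 0) := by
  induction t with
  | nil => intro v; simp [Int.shiftLeft_eq, PySem.Int.bor_zero]
  | cons b r ih =>
    intro v
    simp only [List.foldl_cons, List.length_cons]
    rw [ih (PySem.Int.bor (v <<< (8 : Nat)) b), ih (PySem.Int.bor ((0 : Int) <<< (8 : Nat)) b)]
    rw [show PySem.Int.bor ((0 : Int) <<< (8 : Nat)) b = b by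
          rw [show ((0 : Int) <<< (8 : Nat)) = 0 by rfl, pv_bor_zero_left]]
    rw [pv_shl_bor, ← pv_bor_assoc]
    congr 2
    rw [Int.shiftLeft_eq, Int.shiftLeft_eq, Int.shiftLeft_eq]
    rw [show 8 * (r.length + 1) = 8 + 8 * r.length by ring, pow_add]
    ring

-- the divide-and-conquer assembly computes exactly A's unsigned fold
lemma pv_unsigned_eq (xs : List Int) :
    pvUnsignedBe xs = xs.foldl (fun v b => PySem.Int.bor (v <<< (8 : Nat)) b) 0 := by
  induction hn : xs.length using Nat.strong_induction_on generalizing xs with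
  | _ n ih =>
    rw [pvUnsignedBe]
    by_cases h1 : xs.length ≤ 1
    · rw [dif_pos h1]
      match xs, h1 with
      | [], _ => rfl
      | [x], _ =>
        simp only [List.headD, List.foldl_cons, List.foldl_nil]
        rw [show ((0 : Int) <<< (8 : Nat)) = 0 by rfl, pv_bor_zero_left]
    · rw [dif_neg h1]
      have hlen : 2 ≤ xs.length := by omega
      have hmid : 0 < xs.length / 2 ∧ xs.length / 2 < xs.length := by omega
      have htake : (xs.take (xs.length / 2)).length = xs.length / 2 := by
        simp [List.length_take]; omega
      have hdrop : (xs.drop (xs.length / 2)).length = xs.length - xs.length / 2 := by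
        simp [List.length_drop]
      rw [ih (xs.take (xs.length / 2)).length (by subst hn; omega) _ rfl,
          ih (xs.drop (xs.length / 2)).length (by subst hn; omega) _ rfl]
      conv_rhs => rw [← List.take_append_drop (xs.length / 2) xs]
      rw [List.foldl_append,
          pv_fold_from (xs.drop (xs.length / 2))
            (List.foldl (fun v b => PySem.Int.bor (v <<< (8 : Nat)) b) 0
              (xs.take (xs.length / 2))), hdrop]

-- ===== VERDICT (by name: the statement is the Claim_ definition above) =====
theorem ber_decode_int_spec : Claim_equal_ber_decode_int := by
  intro data _
  unfold Spec_ber_decode_int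
  cases data with
  | nil => rfl
  | cons d0 rest =>
    simp only [ber_decode_int, ber_decode_int_alt, pv_unsigned_eq]
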